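-- pv_equiv track=rewrite | github.com/sprihaapandey/air-canvas | paint_brush.py | is_over_button
-- ===== SOURCE A (Python) =====
-- def is_over_button(x, y):
--     buttons = [
--         ((10, 10), (110, 60)),
--         ((120, 10), (220, 60)),
--         ((230, 10), (330, 60)),
--         ((340, 10), (440, 60)),
--         ((450, 10), (550, 60)),
--         ((560, 10), (660, 60)),
--         ((670, 10), (770, 60)),
--         ((780, 10), (880, 60))
--     ]
--
--     for (x1, y1), (x2, y2) in buttons:
--         if x1 < x < x2 and y1 < y < y2:
--             return True
--     return False
-- ===== SOURCE B (Python) =====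
-- def is_over_button(x, y):
--     # Closed-form index arithmetic over the regular 110px button grid (8 buttons,
--     # 100px wide, 10px gaps, all with y strictly between 10 and 60).
--     if not (10 < y < 60):
--         return False
--     p = x - 10
--     if p <= 0:
--         return False
--     i = p // 110
--     return i <= 7 and 0 < p - 110 * i < 100
-- ===== Notes on version B (the rewrite author's own statement) =====
-- stated objective: simpler
-- what changed: Replaced the scan over the hard-coded list of 8 rectangles with a constant-time closed-form index computation exploiting the regular 110px grid layout.
import Mathlib
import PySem

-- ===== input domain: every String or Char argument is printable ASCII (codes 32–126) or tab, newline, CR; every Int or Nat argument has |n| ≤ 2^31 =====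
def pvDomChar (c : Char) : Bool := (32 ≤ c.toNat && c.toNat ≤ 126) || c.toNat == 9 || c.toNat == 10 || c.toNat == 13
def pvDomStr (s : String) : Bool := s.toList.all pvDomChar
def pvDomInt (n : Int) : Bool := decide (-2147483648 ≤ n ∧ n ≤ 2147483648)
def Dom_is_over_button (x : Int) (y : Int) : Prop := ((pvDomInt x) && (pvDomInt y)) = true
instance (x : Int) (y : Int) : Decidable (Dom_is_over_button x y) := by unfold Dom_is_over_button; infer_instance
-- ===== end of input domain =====

-- B replaces the scan over the hard-coded rectangle list with constant-time index
-- arithmetic on the regular 110px button grid (objective: simpler).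

-- ===== PORT A =====
def pvButtons : List ((Int × Int) × (Int × Int)) :=
  [((10, 10), (110, 60)),
   ((120, 10), (220, 60)),
   ((230, 10), (330, 60)),
   ((340, 10), (440, 60)),
   ((450, 10), (550, 60)),
   ((560, 10), (660, 60)),
   ((670, 10), (770, 60)),
   ((780, 10), (880, 60))]

-- the 'for … return True … return False' loop, as structural recursion
def pvLoopA (x y : Int) : List ((Int × Int) × (Int × Int)) → Bool
  | [] => false
  | ((x1, y1), (x2, y2)) :: rest =>
      if x1 < x ∧ x < x2 ∧ y1 < y ∧ y < y2 then true else pvLoopA x y rest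

def is_over_button (x : Int) (y : Int) : Bool := pvLoopA x y pvButtons

-- ===== PORT B =====
def is_over_button_alt (x : Int) (y : Int) : Bool :=
  if ¬ (10 < y ∧ y < 60) then false
  else
    let p := x - 10
    if p ≤ 0 then false
    else
      let i := PySem.Int.floordiv p 110
      i ≤ 7 ∧ 0 < p - 110 * i ∧ p - 110 * i < 100

-- ===== PRECONDITION & SPEC =====
def Spec_is_over_button (x : Int) (y : Int) (out : Bool) : Prop := out = is_over_button_alt x y
instance (x : Int) (y : Int) (out : Bool) : Decidable (Spec_is_over_button x y out) := by unfold Spec_is_over_button; infer_instance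

-- ===== CLAIM (what is proved, stated in full; the proofs are below) =====
def Claim_equal_is_over_button : Prop := ∀ (x : Int) (y : Int), Dom_is_over_button x y → Spec_is_over_button x y (is_over_button x y)

-- ===== LEMMAS AND PROOFS =====

-- ===== VERDICT (by name: the statement is the Claim_ definition above) =====
theorem is_over_button_spec : Claim_equal_is_over_button := by
  intro x y _
  show is_over_button x y = is_over_button_alt x y
  rw [Bool.eq_iff_iff]
  simp only [is_over_button, pvButtons, pvLoopA, Bool.if_true_left, Bool.if_false_right,
    Bool.or_eq_true, Bool.and_eq_true, decide_eq_true_eq, and_true, is_over_button_alt,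
    PySem.Int.floordiv_eq_ediv_of_pos (show (0:Int) < 110 by norm_num)]
  split_ifs <;> simp only [iff_false, decide_eq_true_eq] <;> omega
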